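-- pv_equiv track=rewrite | github.com/milhud/diffusion_downscaling_model | src/preprocessing/cache_builder.py | _month_for_day
-- ===== SOURCE A (Python) =====
-- def _month_for_day(day_of_year: int, leap: bool = False) -> int:
--     days_in_month = [31, 29 if leap else 28, 31, 30, 31, 30, 31, 31, 30, 31, 30, 31]
--     cum = 0
--     for m, d in enumerate(days_in_month):
--         cum += d
--         if day_of_year <= cum:
--             return m
--     return 11
-- ===== SOURCE B (Python) =====
-- from itertools import accumulate
-- from bisect import bisect_left
--
-- def _month_for_day(day_of_year: int, leap: bool = False) -> int:
--     days_in_month = [31, 29 if leap else 28, 31, 30, 31, 30, 31, 31, 30, 31, 30, 31]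
--     cum = list(accumulate(days_in_month))
--     return min(bisect_left(cum, day_of_year), 11)
-- ===== Notes on version B (the rewrite author's own statement) =====
-- stated objective: idiomatic
-- what changed: Replaces the running-sum loop with an itertools.accumulate prefix table and a bisect_left binary search, clamped to 11 for days past year-end.
import Mathlib
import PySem

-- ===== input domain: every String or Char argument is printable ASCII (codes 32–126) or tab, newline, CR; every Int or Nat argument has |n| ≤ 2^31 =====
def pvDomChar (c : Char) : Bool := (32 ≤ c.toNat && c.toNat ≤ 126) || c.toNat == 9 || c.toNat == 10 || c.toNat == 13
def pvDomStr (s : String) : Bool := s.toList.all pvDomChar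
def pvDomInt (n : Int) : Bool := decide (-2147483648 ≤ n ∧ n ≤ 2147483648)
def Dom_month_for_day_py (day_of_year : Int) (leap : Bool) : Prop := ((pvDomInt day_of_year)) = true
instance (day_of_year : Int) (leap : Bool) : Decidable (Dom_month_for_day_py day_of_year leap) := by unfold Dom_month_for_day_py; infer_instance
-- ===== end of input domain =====

-- B replaces A's running-sum scan with an accumulate prefix table + bisect_left clamped to 11 (idiomatic rewrite, same cost).
-- ===== PORT A =====
-- loop 'for m, d in enumerate(days_in_month): cum += d; if day_of_year <= cum: return m' with fallback 11
def pvALoop (day_of_year : Int) : List Int → Int → Int → Int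
  | [], _, _ => 11
  | d :: rest, m, cum =>
      if day_of_year ≤ cum + d then m else pvALoop day_of_year rest (m + 1) (cum + d)

def month_for_day_py (day_of_year : Int) (leap : Bool) : Int :=
  let days_in_month : List Int := [31, if leap then 29 else 28, 31, 30, 31, 30, 31, 31, 30, 31, 30, 31]
  pvALoop day_of_year days_in_month 0 0

-- ===== PORT B =====
-- itertools.accumulate: running prefix sums
def pvAccum (s : Int) : List Int → List Int
  | [] => []
  | x :: xs => (s + x) :: pvAccum (s + x) xs

-- bisect.bisect_left on a sorted list = number of leading elements < x (exact on sorted input)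
def pvBisectLeft (xs : List Int) (x : Int) : Int :=
  ((xs.takeWhile (fun c => c < x)).length : Int)

def month_for_day_py_alt (day_of_year : Int) (leap : Bool) : Int :=
  let days_in_month : List Int := [31, if leap then 29 else 28, 31, 30, 31, 30, 31, 31, 30, 31, 30, 31]
  let cum := pvAccum 0 days_in_month
  min (pvBisectLeft cum day_of_year) 11

-- ===== PRECONDITION & SPEC =====
def Spec_month_for_day_py (day_of_year : Int) (leap : Bool) (out : Int) : Prop := out = month_for_day_py_alt day_of_year leap
instance (day_of_year : Int) (leap : Bool) (out : Int) : Decidable (Spec_month_for_day_py day_of_year leap out) := by unfold Spec_month_for_day_py; infer_instance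

-- ===== CLAIM (what is proved, stated in full; the proofs are below) =====
def Claim_equal_month_for_day_py : Prop := ∀ (day_of_year : Int) (leap : Bool), Dom_month_for_day_py day_of_year leap → Spec_month_for_day_py day_of_year leap (month_for_day_py day_of_year leap)

-- ===== LEMMAS AND PROOFS =====

-- A's running-sum loop returns 11 when every prefix sum is < d, else m plus the count of leading prefix sums < d
theorem pvALoop_eq (d : Int) (ds : List Int) (m cum : Int) (h : ds ≠ []) :
    pvALoop d ds m cum =
      if ((pvAccum cum ds).takeWhile (fun c => c < d)).length = ds.length then 11
      else m + ((pvAccum cum ds).takeWhile (fun c => c < d)).length := by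
  induction ds generalizing m cum with
  | nil => exact absurd rfl h
  | cons x rest ih =>
    simp only [pvALoop, pvAccum, List.takeWhile]
    by_cases hx : d ≤ cum + x
    · have hlt : ¬ (cum + x < d) := by omega
      simp [hlt]
    · have hlt : cum + x < d := by omega
      simp only [hlt, decide_true, List.length_cons]
      cases rest with
      | nil => simp [pvALoop, pvAccum, hx]
      | cons y t =>
        rw [if_neg hx, ih (m + 1) (cum + x) (by simp)]
        split_ifs <;> push_cast <;> omega

-- ===== VERDICT (by name: the statement is the Claim_ definition above) =====
theorem month_for_day_py_spec : Claim_equal_month_for_day_py := by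
  intro d leap _
  unfold Spec_month_for_day_py month_for_day_py
  have halt : month_for_day_py_alt d leap =
      min (pvBisectLeft (pvAccum 0 [31, if leap then (29:Int) else 28, 31, 30, 31, 30, 31, 31, 30, 31, 30, 31]) d) 11 := rfl
  rw [halt, pvALoop_eq d _ 0 0 (by cases leap <;> simp)]
  have hlen : ([31, if leap then (29:Int) else 28, 31, 30, 31, 30, 31, 31, 30, 31, 30, 31] : List Int).length = 12 := by
    cases leap <;> simp
  have haccum : (pvAccum 0 [31, if leap then (29:Int) else 28, 31, 30, 31, 30, 31, 31, 30, 31, 30, 31]).length = 12 := by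
    cases leap <;> simp [pvAccum]
  have hle := (List.takeWhile_sublist (l := pvAccum 0 [31, if leap then (29:Int) else 28, 31, 30, 31, 30, 31, 31, 30, 31, 30, 31]) (fun c => decide (c < d))).length_le
  rw [haccum] at hle
  rw [hlen]
  simp only [pvBisectLeft]
  by_cases h : (List.takeWhile (fun c => decide (c < d))
      (pvAccum 0 [31, if leap then (29:Int) else 28, 31, 30, 31, 30, 31, 31, 30, 31, 30, 31])).length = 12
  · rw [if_pos h, h]; omega
  · rw [if_neg h]; omega
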